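-- pv_equiv track=rewrite | github.com/RAIRLab/bloxorz | level_stitcher_rock.py | mergeLevelsHorizontal
-- ===== SOURCE A (Python) =====
-- emptySpace = "  "
--
-- floorSpace = "XX"
--
-- initialSpace = "II"
--
-- goalSpace = "GG"
--
-- padding = 4
--
-- def mergeLevelsHorizontal(level1, level2):
--     level1Col = len(level1[0])
--     level1Row = len(level1)
--     level2Col = len(level2[0])
--     level2Row = len(level2)
--     bigGridCol = level1Col + level2Col + (padding*4)
--     bigGridRow = max(level1Row, level2Row) + (padding*4)
--     bigGrid = []
--     bridgeStart = ()
--     bridgeEnd = ()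
--     for i in range(bigGridRow):
--         line = []
--         for j in range(bigGridCol):
--             line.append(emptySpace)
--         bigGrid.append(line)
--
--     for i in range(level1Row):
--         for j in range(level1Col):
--             bigGrid[i + padding][j + padding] = level1[i][j]
--             if level1[i][j] == goalSpace:
--                 bridgeStart = (i + padding, j + padding)
--
--     for i in range(level2Row):
--         for j in range(level2Col):
--             bigGrid[i + padding][j + level1Col + (3*padding)] = level2[i][j]
--             if level2[i][j] == initialSpace:
--                 bridgeEnd = (i + padding, j + level1Col + (3*padding))
--     bigGrid[bridgeStart[0]][bridgeStart[1]] = floorSpace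
--     bigGrid[bridgeEnd[0]][bridgeEnd[1]] = floorSpace
--     return bigGrid, (bridgeStart, bridgeEnd)
-- ===== SOURCE B (Python) =====
-- emptySpace = "  "
--
-- floorSpace = "XX"
--
-- initialSpace = "II"
--
-- goalSpace = "GG"
--
-- padding = 4
--
-- def mergeLevelsHorizontal(level1, level2):
--     c1 = len(level1[0])
--     c2 = len(level2[0])
--     r1 = len(level1)
--     r2 = len(level2)
--     pad = [emptySpace] * padding
--     gap = [emptySpace] * (2 * padding)
--
--     def last_pos(grid, cols, target):
--         hits = [(i, j) for i, row in enumerate(grid) for j in range(cols) if row[j] == target]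
--         return hits[-1] if hits else ()
--
--     gi, gj = last_pos(level1, c1, goalSpace)
--     ei, ej = last_pos(level2, c2, initialSpace)
--     start = (gi + padding, gj + padding)
--     end = (ei + padding, ej + c1 + 3 * padding)
--
--     big = []
--     for i in range(max(r1, r2) + 4 * padding):
--         seg1 = list(level1[i - padding][:c1]) if padding <= i < padding + r1 else [emptySpace] * c1
--         seg2 = list(level2[i - padding][:c2]) if padding <= i < padding + r2 else [emptySpace] * c2
--         row = pad + seg1 + gap + seg2 + pad
--         if i == start[0]:
--             row[start[1]] = floorSpace
--         if i == end[0]: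
--             row[end[1]] = floorSpace
--         big.append(row)
--     return big, (start, end)
-- ===== Notes on version B (the rewrite author's own statement) =====
-- stated objective: alternative
-- what changed: B builds each output row directly by concatenating padding/level/gap segments and finds the two bridge cells by one comprehension per level (last hit), instead of pre-allocating an empty max-size grid and overwriting it cell by cell inside nested index loops.
import Mathlib
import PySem

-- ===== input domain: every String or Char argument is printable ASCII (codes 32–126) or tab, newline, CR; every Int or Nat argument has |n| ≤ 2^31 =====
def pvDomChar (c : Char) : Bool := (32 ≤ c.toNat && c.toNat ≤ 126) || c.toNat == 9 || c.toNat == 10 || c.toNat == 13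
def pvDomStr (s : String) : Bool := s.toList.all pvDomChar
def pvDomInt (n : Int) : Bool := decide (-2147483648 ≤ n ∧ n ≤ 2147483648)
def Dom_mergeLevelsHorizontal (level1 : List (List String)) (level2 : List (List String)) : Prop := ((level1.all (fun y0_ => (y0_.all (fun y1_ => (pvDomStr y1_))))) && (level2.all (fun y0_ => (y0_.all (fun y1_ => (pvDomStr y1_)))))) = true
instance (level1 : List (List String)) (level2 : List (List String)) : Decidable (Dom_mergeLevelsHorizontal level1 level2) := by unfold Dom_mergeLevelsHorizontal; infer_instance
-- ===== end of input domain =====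

-- B replaces A's preallocate-then-overwrite grid construction by direct row
-- concatenation and finds the two bridge cells by one comprehension per level;
-- alternative decomposition, no speed claim.

-- ===== PORT A =====
-- Literal transliteration of A.  level1[0] is ported as headD [] (an empty
-- level1/level2 raises IndexError in Python and is excluded by Pre_); the
-- bridge tuples start as Python's (), ported as Option none, and the final
-- bigGrid[()[0]] IndexError inputs are likewise excluded by Pre_ (getD (0,0)
-- is only reached outside Pre_).  In-range indexing level1[i][j] is ported as
-- getD (exact under Pre_, which excludes rows shorter than row 0).
def mergeLevelsHorizontal (level1 : List (List String)) (level2 : List (List String)) : List (List String) × ((Int × Int) × (Int × Int)) :=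
  let level1Col := (level1.headD []).length
  let level1Row := level1.length
  let level2Col := (level2.headD []).length
  let level2Row := level2.length
  let bigGridCol := level1Col + level2Col + 4 * 4
  let bigGridRow := max level1Row level2Row + 4 * 4
  let bigGrid : List (List String) :=
    (List.range bigGridRow).foldl (fun g _ =>
      g ++ [(List.range bigGridCol).foldl (fun line _ => line ++ ["  "]) []]) []
  let st1 := (List.range level1Row).foldl (fun (st : List (List String) × Option (Nat × Nat)) i =>
      (List.range level1Col).foldl (fun st j =>
        (st.1.modify (i + 4) (fun row => row.set (j + 4) ((level1.getD i []).getD j "")),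
         if (level1.getD i []).getD j "" = "GG" then some (i + 4, j + 4) else st.2)) st)
    (bigGrid, (none : Option (Nat × Nat)))
  let st2 := (List.range level2Row).foldl (fun (st : List (List String) × Option (Nat × Nat)) i =>
      (List.range level2Col).foldl (fun st j =>
        (st.1.modify (i + 4) (fun row => row.set (j + level1Col + 3 * 4) ((level2.getD i []).getD j "")),
         if (level2.getD i []).getD j "" = "II" then some (i + 4, j + level1Col + 3 * 4) else st.2)) st)
    (st1.1, (none : Option (Nat × Nat)))
  let bridgeStart := st1.2.getD (0, 0)
  let bridgeEnd := st2.2.getD (0, 0)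
  let g := (st2.1.modify bridgeStart.1 (fun row => row.set bridgeStart.2 "XX")).modify
              bridgeEnd.1 (fun row => row.set bridgeEnd.2 "XX")
  (g, (((bridgeStart.1 : Int), (bridgeStart.2 : Int)), ((bridgeEnd.1 : Int), (bridgeEnd.2 : Int))))

-- ===== PORT B =====
-- the comprehension [(i, j) for i, row in enumerate(grid) for j in range(cols) if row[j] == target]
def lastHits (grid : List (List String)) (cols : Nat) (target : String) : List (Nat × Nat) :=
  (List.range grid.length).flatMap (fun i =>
    ((List.range cols).filter (fun j => (grid.getD i []).getD j "" = target)).map (fun j => (i, j)))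

-- Literal transliteration of B.  hits[-1] is ported as getLast? (the empty-hits
-- () unpacking raises in Python; outside Pre_, getD (0,0) stands in); the slice
-- level[i-padding][:c] is exactly take c (c is a Nat length here).
def mergeLevelsHorizontal_alt (level1 : List (List String)) (level2 : List (List String)) : List (List String) × ((Int × Int) × (Int × Int)) :=
  let c1 := (level1.headD []).length
  let c2 := (level2.headD []).length
  let r1 := level1.length
  let r2 := level2.length
  let s := (lastHits level1 c1 "GG").getLast?.getD (0, 0)
  let e := (lastHits level2 c2 "II").getLast?.getD (0, 0)
  let start : Nat × Nat := (s.1 + 4, s.2 + 4)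
  let fin : Nat × Nat := (e.1 + 4, e.2 + c1 + 3 * 4)
  let big := (List.range (max r1 r2 + 4 * 4)).map (fun i =>
    let seg1 := if 4 ≤ i ∧ i < 4 + r1 then (level1.getD (i - 4) []).take c1 else List.replicate c1 "  "
    let seg2 := if 4 ≤ i ∧ i < 4 + r2 then (level2.getD (i - 4) []).take c2 else List.replicate c2 "  "
    let row := List.replicate 4 "  " ++ seg1 ++ List.replicate (2 * 4) "  " ++ seg2 ++ List.replicate 4 "  "
    let row := if i = start.1 then row.set start.2 "XX" else row
    if i = fin.1 then row.set fin.2 "XX" else row)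
  (big, (((start.1 : Int), (start.2 : Int)), ((fin.1 : Int), (fin.2 : Int))))

-- ===== PRECONDITION & SPEC =====
-- Pre_ is exactly where the Python A returns: both levels nonempty, no row
-- shorter than row 0 (A indexes every row up to len(row 0), IndexError
-- otherwise), and a goal cell "GG" in level1 / initial cell "II" in level2
-- within those columns (otherwise the empty bridge tuple is indexed,
-- IndexError).
def Pre_mergeLevelsHorizontal (level1 : List (List String)) (level2 : List (List String)) : Prop :=
  level1 ≠ [] ∧ level2 ≠ [] ∧
  (∀ row ∈ level1, (level1.headD []).length ≤ row.length) ∧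
  (∀ row ∈ level2, (level2.headD []).length ≤ row.length) ∧
  (∃ row ∈ level1, "GG" ∈ row.take (level1.headD []).length) ∧
  (∃ row ∈ level2, "II" ∈ row.take (level2.headD []).length)
instance (level1 : List (List String)) (level2 : List (List String)) : Decidable (Pre_mergeLevelsHorizontal level1 level2) := by unfold Pre_mergeLevelsHorizontal; infer_instance

def pvWitness_mergeLevelsHorizontal : List (List String) × List (List String) := ([["GG"]], [["II"]])

def Spec_mergeLevelsHorizontal (level1 : List (List String)) (level2 : List (List String)) (out : List (List String) × ((Int × Int) × (Int × Int))) : Prop := out = mergeLevelsHorizontal_alt level1 level2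
instance (level1 : List (List String)) (level2 : List (List String)) (out : List (List String) × ((Int × Int) × (Int × Int))) : Decidable (Spec_mergeLevelsHorizontal level1 level2 out) := by unfold Spec_mergeLevelsHorizontal; infer_instance

-- ===== CLAIM (what is proved, stated in full; the proofs are below) =====
def Claim_equal_mergeLevelsHorizontal : Prop := ∀ (level1 : List (List String)) (level2 : List (List String)), Dom_mergeLevelsHorizontal level1 level2 → Pre_mergeLevelsHorizontal level1 level2 → Spec_mergeLevelsHorizontal level1 level2 (mergeLevelsHorizontal level1 level2)

-- ===== LEMMAS AND PROOFS =====

-- a nested loop with two independent accumulators is two nested loops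
theorem nested_foldl_prod {α γ : Type} {β δ : Type}
    (out : List α) (inner : α → List γ)
    (fg : β → α → γ → β) (gg : δ → α → γ → δ) (a : β) (b : δ) :
    out.foldl (fun st i => (inner i).foldl (fun st j => (fg st.1 i j, gg st.2 i j)) st) (a, b)
    = (out.foldl (fun s i => (inner i).foldl (fun s j => fg s i j) s) a,
       out.foldl (fun s i => (inner i).foldl (fun s j => gg s i j) s) b) := by
  induction out generalizing a b with
  | nil => rfl
  | cons x xs ih =>
      simp only [List.foldl_cons]
      rw [PySem.List.foldl_prod_mk (fun s j => fg s x j) (fun s j => gg s x j), ih]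

-- 'last match wins' accumulator = last element of the matching sublist
theorem foldl_last_ite {α β : Type} (p : α → Prop) [DecidablePred p] (f : α → β)
    (xs : List α) (b : Option β) :
    xs.foldl (fun acc x => if p x then some (f x) else acc) b
    = (xs.filter (fun x => decide (p x))).getLast?.elim b (fun x => some (f x)) := by
  induction xs using List.reverseRecOn with
  | nil => rfl
  | append_singleton xs x ih =>
      rw [List.foldl_append, List.filter_append]
      by_cases h : p x
      · simp [h]
      · simp [h, ih]

-- modify of a map-over-range grid, pointwise
theorem modify_map_range {α : Type} (n t : Nat) (f : α → α) (H : Nat → α) (_ht : t < n) :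
    ((List.range n).map H).modify t f
    = (List.range n).map (fun s => if s = t then f (H s) else H s) := by
  apply List.ext_getElem
  · simp
  · intro j h1 h2
    simp only [List.getElem_modify, List.getElem_map, List.getElem_range]
    by_cases hj : j = t
    · simp [hj]
    · simp [hj, Ne.symm hj]

-- a fold of modifies of the same row is one modify of that row
theorem foldl_modify_same {α β : Type} (xs : List β) (t : Nat) (g : List α) (F : β → α → α) :
    xs.foldl (fun g x => g.modify t (F x)) g
    = g.modify t (fun row => xs.foldl (fun r x => F x r) row) := by
  induction xs generalizing g with
  | nil => simp [show (fun row : α => row) = id from rfl, List.modify_id]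
  | cons x xs ih =>
      simp only [List.foldl_cons]
      rw [ih, List.modify_modify_eq]
      rfl

-- a fold of modifies of rows k, k+1, …, k+m-1 of a map-over-range grid
theorem foldl_modify_map_range {α : Type} (n m k : Nat) (G : Nat → α) (F : Nat → α → α)
    (h : k + m ≤ n) :
    (List.range m).foldl (fun g i => g.modify (i + k) (F i)) ((List.range n).map G)
    = (List.range n).map (fun t => if k ≤ t ∧ t < k + m then F (t - k) (G t) else G t) := by
  induction m with
  | zero =>
      simp only [List.range_zero, List.foldl_nil]
      refine List.map_congr_left fun t _ => ?_
      rw [if_neg (by omega)]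
  | succ m ih =>
      rw [List.range_succ, List.foldl_append, ih (by omega)]
      simp only [List.foldl_cons, List.foldl_nil]
      rw [modify_map_range n (m + k) _ _ (by omega)]
      refine List.map_congr_left fun t _ => ?_
      by_cases h1 : t = m + k
      · subst h1
        rw [if_pos rfl, if_neg (by omega), if_pos (by omega)]
        have hmk : m + k - k = m := by omega
        rw [hmk]
      · rw [if_neg h1]
        by_cases h2 : k ≤ t ∧ t < k + m
        · rw [if_pos h2, if_pos (by omega)]
        · rw [if_neg h2, if_neg (by omega)]

-- writing cells k, k+1, …, k+m-1 of a ++ b (|a| = k) is splicing in the written segment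
theorem foldl_set_append {α : Type} (a b : List α) (k m : Nat) (f : Nat → α)
    (hk : a.length = k) (hm : m ≤ b.length) :
    (List.range m).foldl (fun r j => r.set (j + k) (f j)) (a ++ b)
    = a ++ ((List.range m).map f ++ b.drop m) := by
  induction m with
  | zero => simp
  | succ m ih =>
      rw [List.range_succ, List.foldl_append, ih (by omega)]
      simp only [List.foldl_cons, List.foldl_nil]
      rw [List.set_append, if_neg (by simp [hk])]
      rw [List.set_append, if_neg (by simp [hk])]
      rw [List.drop_eq_getElem_cons (show m < b.length by omega)]
      have h1 : m + k - a.length = m := by omega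
      have h2 : m - (List.map f (List.range m)).length = 0 := by simp
      rw [h1, h2, List.set_cons_zero, List.map_append, List.map_cons, List.map_nil]
      simp

theorem map_getD_range {α : Type} (l : List α) (d : α) (m : Nat) (h : m ≤ l.length) :
    (List.range m).map (fun j => l.getD j d) = l.take m := by
  apply List.ext_getElem
  · simp; omega
  · intro i h1 h2
    simp only [List.getElem_map, List.getElem_range, List.getElem_take]
    rw [List.getD_eq_getElem _ _ (by simp at h1; omega)]


-- the nested 'last match wins' scan over all cells = last element of the hits list
theorem bridge_fold {α : Type} (lvl : List (List String)) (cols : Nat) (target : String)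
    (g : Nat → Nat → α) :
    (List.range lvl.length).foldl (fun b i => (List.range cols).foldl (fun b j =>
        if (lvl.getD i []).getD j "" = target then some (g i j) else b) b) (none : Option α)
    = (lastHits lvl cols target).getLast?.map (fun p => g p.1 p.2) := by
  have h1 : (List.range lvl.length).foldl (fun b i => (List.range cols).foldl (fun b j =>
        if (lvl.getD i []).getD j "" = target then some (g i j) else b) b) (none : Option α)
      = ((List.range lvl.length).flatMap (fun i => (List.range cols).map (fun j => (i, j)))).foldl
          (fun b (q : Nat × Nat) =>
            if (lvl.getD q.1 []).getD q.2 "" = target then some (g q.1 q.2) else b) none := by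
    rw [List.foldl_flatMap]
    simp only [List.foldl_map]
  rw [h1, foldl_last_ite (fun q : Nat × Nat => (lvl.getD q.1 []).getD q.2 "" = target)
      (fun q : Nat × Nat => g q.1 q.2)]
  have h2 : ((List.range lvl.length).flatMap (fun i => (List.range cols).map (fun j => (i, j)))).filter
      (fun q : Nat × Nat => decide ((lvl.getD q.1 []).getD q.2 "" = target))
      = lastHits lvl cols target := by
    rw [List.filter_flatMap]
    simp only [List.filter_map, Function.comp_def, lastHits]
  rw [h2]
  cases (lastHits lvl cols target).getLast? <;> rfl

-- one level-copying phase of A: the pair fold splits into grid fold and bridge scan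
theorem phase_eq (lvl : List (List String)) (cols : Nat) (target : String)
    (g0 : List (List String)) (colIdx : Nat → Nat) :
    (List.range lvl.length).foldl (fun (st : List (List String) × Option (Nat × Nat)) i =>
        (List.range cols).foldl (fun st j =>
          (st.1.modify (i + 4) (fun row => row.set (colIdx j) ((lvl.getD i []).getD j "")),
           if (lvl.getD i []).getD j "" = target then some (i + 4, colIdx j) else st.2)) st)
      (g0, (none : Option (Nat × Nat)))
    = ((List.range lvl.length).foldl (fun g i => g.modify (i + 4)
          (fun row => (List.range cols).foldl
            (fun r j => r.set (colIdx j) ((lvl.getD i []).getD j "")) row)) g0,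
       (lastHits lvl cols target).getLast?.map (fun p => (p.1 + 4, colIdx p.2))) := by
  have hsplit := nested_foldl_prod (List.range lvl.length) (fun _ => List.range cols)
      (fun g i j => g.modify (i + 4) (fun row => row.set (colIdx j) ((lvl.getD i []).getD j "")))
      (fun b i j => if (lvl.getD i []).getD j "" = target then some (i + 4, colIdx j) else b)
      g0 (none : Option (Nat × Nat))
  rw [hsplit]
  rw [bridge_fold lvl cols target (fun i j => (i + 4, colIdx j))]
  simp only [foldl_modify_same]

-- the two phases, with their literal column-index expressions
theorem phase1_eq (lvl : List (List String)) (cols : Nat) (target : String)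
    (g0 : List (List String)) :
    (List.range lvl.length).foldl (fun (st : List (List String) × Option (Nat × Nat)) i =>
        (List.range cols).foldl (fun st j =>
          (st.1.modify (i + 4) (fun row => row.set (j + 4) ((lvl.getD i []).getD j "")),
           if (lvl.getD i []).getD j "" = target then some (i + 4, j + 4) else st.2)) st)
      (g0, (none : Option (Nat × Nat)))
    = ((List.range lvl.length).foldl (fun g i => g.modify (i + 4)
          (fun row => (List.range cols).foldl
            (fun r j => r.set (j + 4) ((lvl.getD i []).getD j "")) row)) g0,
       (lastHits lvl cols target).getLast?.map (fun p => (p.1 + 4, p.2 + 4))) :=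
  phase_eq lvl cols target g0 (fun j => j + 4)

theorem phase2_eq (lvl : List (List String)) (cols : Nat) (target : String)
    (g0 : List (List String)) (c0 : Nat) :
    (List.range lvl.length).foldl (fun (st : List (List String) × Option (Nat × Nat)) i =>
        (List.range cols).foldl (fun st j =>
          (st.1.modify (i + 4) (fun row => row.set (j + c0 + 3 * 4) ((lvl.getD i []).getD j "")),
           if (lvl.getD i []).getD j "" = target then some (i + 4, j + c0 + 3 * 4) else st.2)) st)
      (g0, (none : Option (Nat × Nat)))
    = ((List.range lvl.length).foldl (fun g i => g.modify (i + 4)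
          (fun row => (List.range cols).foldl
            (fun r j => r.set (j + c0 + 3 * 4) ((lvl.getD i []).getD j "")) row)) g0,
       (lastHits lvl cols target).getLast?.map (fun p => (p.1 + 4, p.2 + c0 + 3 * 4))) :=
  phase_eq lvl cols target g0 (fun j => j + c0 + 3 * 4)

-- a marker inside the scanned rectangle makes the hits list nonempty
theorem hits_ne_nil (lvl : List (List String)) (cols : Nat) (target : String)
    (h : ∃ row ∈ lvl, target ∈ row.take cols) : lastHits lvl cols target ≠ [] := by
  obtain ⟨row, hrow, ht⟩ := h
  obtain ⟨i, hi, hrowi⟩ := List.mem_iff_getElem.mp hrow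
  obtain ⟨j, hj, hj2⟩ := List.mem_iff_getElem.mp ht
  have hjc : j < cols := by simp at hj; omega
  have hjr : j < row.length := by simp at hj; omega
  apply List.ne_nil_of_mem (a := (i, j))
  simp only [lastHits, List.mem_flatMap, List.mem_map, List.mem_filter, List.mem_range]
  refine ⟨i, hi, j, ⟨hjc, ?_⟩, rfl⟩
  rw [List.getD_eq_getElem _ _ hi, hrowi, List.getD_eq_getElem _ _ hjr]
  simp only [List.getElem_take] at hj2
  simp [hj2]

theorem hits_bounds (lvl : List (List String)) (cols : Nat) (target : String)
    {p : Nat × Nat} (h : p ∈ lastHits lvl cols target) : p.1 < lvl.length ∧ p.2 < cols := by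
  simp only [lastHits, List.mem_flatMap, List.mem_map, List.mem_filter, List.mem_range] at h
  obtain ⟨i, hi, j, ⟨hj, -⟩, rfl⟩ := h
  exact ⟨hi, hj⟩

-- ===== VERDICT (by name: the statement is the Claim_ definition above) =====
theorem mergeLevelsHorizontal_spec : Claim_equal_mergeLevelsHorizontal := by
  intro l1 l2 _ hpre
  obtain ⟨h1ne, h2ne, hlen1, hlen2, hgg, hii⟩ := hpre
  have hne1 := hits_ne_nil l1 (l1.headD []).length "GG" hgg
  have hne2 := hits_ne_nil l2 (l2.headD []).length "II" hii
  cases hgl : (lastHits l1 (l1.headD []).length "GG").getLast? with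
  | none => exact absurd (List.getLast?_eq_none_iff.mp hgl) hne1
  | some s =>
  cases hel : (lastHits l2 (l2.headD []).length "II").getLast? with
  | none => exact absurd (List.getLast?_eq_none_iff.mp hel) hne2
  | some e =>
  obtain ⟨hs1, hs2⟩ := hits_bounds l1 _ "GG" (List.mem_of_getLast? hgl)
  obtain ⟨he1, he2⟩ := hits_bounds l2 _ "II" (List.mem_of_getLast? hel)
  simp only [Spec_mergeLevelsHorizontal, mergeLevelsHorizontal, mergeLevelsHorizontal_alt]
  have hline : (List.range ((l1.headD []).length + (l2.headD []).length + 4 * 4)).foldl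
      (fun line _ => line ++ ["  "]) ([] : List String)
      = List.replicate ((l1.headD []).length + (l2.headD []).length + 4 * 4) "  " := by
    simp [List.map_const']
  rw [hline]
  have hgrid0 : (List.range (max l1.length l2.length + 4 * 4)).foldl
      (fun g _ => g ++ [List.replicate ((l1.headD []).length + (l2.headD []).length + 4 * 4) "  "])
      ([] : List (List String))
      = (List.range (max l1.length l2.length + 4 * 4)).map
          (fun _ => List.replicate ((l1.headD []).length + (l2.headD []).length + 4 * 4) "  ") := by
    simp
  rw [hgrid0]
  rw [phase1_eq l1 (l1.headD []).length "GG" _]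
  dsimp only
  rw [hgl]
  simp only [Option.map_some, Option.getD_some]
  rw [phase2_eq l2 (l2.headD []).length "II" _ (l1.headD []).length]
  dsimp only
  rw [hel]
  simp only [Option.map_some, Option.getD_some]
  -- lengths of rows reached by the loops
  have hlen1' : ∀ i, i < l1.length → (l1.headD []).length ≤ (l1.getD i []).length := by
    intro i hi
    refine hlen1 _ ?_
    rw [List.getD_eq_getElem _ _ hi]
    exact List.getElem_mem _
  have hlen2' : ∀ i, i < l2.length → (l2.headD []).length ≤ (l2.getD i []).length := by
    intro i hi
    refine hlen2 _ ?_
    rw [List.getD_eq_getElem _ _ hi]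
    exact List.getElem_mem _
  -- the empty big-grid row, split into the five segments
  have hsplit0 : List.replicate ((l1.headD []).length + (l2.headD []).length + 4 * 4) ("  " : String)
      = List.replicate 4 "  " ++ (List.replicate (l1.headD []).length "  " ++ (List.replicate 8 "  " ++
          (List.replicate (l2.headD []).length "  " ++ List.replicate 4 "  "))) := by
    rw [← List.replicate_add, ← List.replicate_add, ← List.replicate_add, ← List.replicate_add]
    congr 1
    omega
  -- one phase-1 row
  have hrow1 : ∀ i, i < l1.length →
      List.foldl (fun r j => r.set (j + 4) ((l1.getD i []).getD j ""))
        (List.replicate ((l1.headD []).length + (l2.headD []).length + 4 * 4) "  ") (List.range (l1.headD []).length)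
      = List.replicate 4 "  " ++ (List.take (l1.headD []).length (l1.getD i []) ++ (List.replicate 8 "  " ++
          (List.replicate (l2.headD []).length "  " ++ List.replicate 4 "  "))) := by
    intro i hi
    rw [hsplit0]
    rw [foldl_set_append (List.replicate 4 "  ")
        (List.replicate (l1.headD []).length "  " ++ (List.replicate 8 "  " ++
          (List.replicate (l2.headD []).length "  " ++ List.replicate 4 "  ")))
        4 (l1.headD []).length (fun j => (l1.getD i []).getD j "") (by simp) (by simp)]
    rw [map_getD_range _ _ _ (hlen1' i hi)]
    rw [List.drop_left' (by simp)]
  -- one phase-2 row, written over any row whose first segment block has length c1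
  have hrow2 : ∀ i, i < l2.length → ∀ S1 : List String, S1.length = (l1.headD []).length →
      List.foldl (fun r j => r.set (j + (l1.headD []).length + 3 * 4) ((l2.getD i []).getD j ""))
        (List.replicate 4 "  " ++ (S1 ++ (List.replicate 8 "  " ++
          (List.replicate (l2.headD []).length "  " ++ List.replicate 4 "  "))))
        (List.range (l2.headD []).length)
      = List.replicate 4 "  " ++ (S1 ++ (List.replicate 8 "  " ++
          (List.take (l2.headD []).length (l2.getD i []) ++ List.replicate 4 "  "))) := by
    intro i hi S1 hS1
    have hfun : (fun (r : List String) (j : Nat) => r.set (j + (l1.headD []).length + 3 * 4) ((l2.getD i []).getD j ""))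
        = (fun (r : List String) (j : Nat) => r.set (j + ((l1.headD []).length + 3 * 4)) ((l2.getD i []).getD j "")) := by
      funext r j
      rw [Nat.add_assoc]
    rw [hfun]
    rw [show List.replicate 4 ("  " : String) ++ (S1 ++ (List.replicate 8 "  " ++
          (List.replicate (l2.headD []).length "  " ++ List.replicate 4 "  ")))
        = (List.replicate 4 "  " ++ (S1 ++ List.replicate 8 "  ")) ++
          (List.replicate (l2.headD []).length "  " ++ List.replicate 4 "  ") by simp [List.append_assoc]]
    rw [foldl_set_append (List.replicate 4 "  " ++ (S1 ++ List.replicate 8 "  "))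
        (List.replicate (l2.headD []).length "  " ++ List.replicate 4 "  ")
        ((l1.headD []).length + 3 * 4) (l2.headD []).length (fun j => (l2.getD i []).getD j "") (by simp [hS1]) (by simp)]
    rw [map_getD_range _ _ _ (hlen2' i hi)]
    rw [List.drop_left' (by simp)]
    simp [List.append_assoc]
  -- phase 1 grid
  rw [foldl_modify_map_range (max l1.length l2.length + 4 * 4) l1.length 4
      (fun _ => List.replicate ((l1.headD []).length + (l2.headD []).length + 4 * 4) "  ")
      (fun i => fun row => List.foldl (fun r j => r.set (j + 4) ((l1.getD i []).getD j "")) row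
        (List.range (l1.headD []).length))
      (by omega)]
  -- phase 2 grid
  rw [foldl_modify_map_range (max l1.length l2.length + 4 * 4) l2.length 4
      (fun t => if 4 ≤ t ∧ t < 4 + l1.length then
          List.foldl (fun r j => r.set (j + 4) ((l1.getD (t - 4) []).getD j ""))
            (List.replicate ((l1.headD []).length + (l2.headD []).length + 4 * 4) "  ") (List.range (l1.headD []).length)
        else List.replicate ((l1.headD []).length + (l2.headD []).length + 4 * 4) "  ")
      (fun i => fun row => List.foldl (fun r j => r.set (j + (l1.headD []).length + 3 * 4) ((l2.getD i []).getD j "")) row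
        (List.range (l2.headD []).length))
      (by omega)]
  -- the two floor cells
  rw [modify_map_range (max l1.length l2.length + 4 * 4) (s.1 + 4) (fun row : List String => row.set (s.2 + 4) "XX") _ (by omega)]
  rw [modify_map_range (max l1.length l2.length + 4 * 4) (e.1 + 4) (fun row : List String => row.set (e.2 + (l1.headD []).length + 3 * 4) "XX") _ (by omega)]
  refine Prod.ext ?_ rfl
  refine List.map_congr_left fun t ht => ?_
  have htn : t < (max l1.length l2.length + 4 * 4) := List.mem_range.mp ht
  by_cases hb1 : 4 ≤ t ∧ t < 4 + l1.length <;> by_cases hb2 : 4 ≤ t ∧ t < 4 + l2.length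
  · simp only [if_pos hb1, if_pos hb2]
    rw [hrow1 (t - 4) (by omega)]
    rw [hrow2 (t - 4) (by omega) _
        (by have := hlen1' (t - 4) (by omega); rw [List.length_take]; omega)]
    simp [List.append_assoc]
  · simp only [if_pos hb1, if_neg hb2]
    rw [hrow1 (t - 4) (by omega)]
    simp [List.append_assoc]
  · simp only [if_neg hb1, if_pos hb2]
    rw [hsplit0]
    rw [hrow2 (t - 4) (by omega) _ (by simp)]
    simp [List.append_assoc]
  · simp only [if_neg hb1, if_neg hb2]
    rw [hsplit0]
    simp [List.append_assoc]
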